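-- pv_equiv track=rewrite | github.com/dav12id3/MethylCraft | helper.py | bisulfite_convert
-- ===== SOURCE A (Python) =====
-- def bisulfite_convert(sequence: str):
--     """
--     Perform in silico bisulfite conversion.
--
--     Args:
--         sequence (str): Original DNA sequence (assumed uppercase).
--
--     Returns:
--         Tuple[str, str]: (methylated_sequence, unmethylated_sequence)
--     """
--     sequence = sequence.upper()
--     methylated = []
--     i = 0
--     while i < len(sequence):
--         if sequence[i] == 'C':
--             # If this C is part of a CpG site
--             if i + 1 < len(sequence) and sequence[i + 1] == 'G':
--                 methylated.append('C')  # leave C unchanged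
--             else:
--                 methylated.append('T')  # convert non-CpG C to T
--         else:
--             methylated.append(sequence[i])
--         i += 1
--
--     # Unmethylated: convert all C to T
--     unmethylated = sequence.replace('C', 'T')
--
--     return ''.join(methylated), unmethylated
-- ===== SOURCE B (Python) =====
-- def bisulfite_convert(sequence: str):
--     """In silico bisulfite conversion: single right-to-left pass carrying a
--     'next char is G' flag instead of an index loop with lookahead."""
--     sequence = sequence.upper()
--     meth = []
--     next_is_g = False
--     for c in reversed(sequence):
--         if c == 'C':
--             meth.append('C' if next_is_g else 'T')
--         else:
--             meth.append(c)
--         next_is_g = (c == 'G')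
--     meth.reverse()
--     return ''.join(meth), sequence.replace('C', 'T')
-- ===== Notes on version B (the rewrite author's own statement) =====
-- stated objective: faster
-- what changed: Replaces the index-based while loop with s[i+1] lookahead by a single right-to-left traversal that carries a next-is-G flag and builds the methylated sequence back-to-front, avoiding per-character indexing and bounds checks.
import Mathlib
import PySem

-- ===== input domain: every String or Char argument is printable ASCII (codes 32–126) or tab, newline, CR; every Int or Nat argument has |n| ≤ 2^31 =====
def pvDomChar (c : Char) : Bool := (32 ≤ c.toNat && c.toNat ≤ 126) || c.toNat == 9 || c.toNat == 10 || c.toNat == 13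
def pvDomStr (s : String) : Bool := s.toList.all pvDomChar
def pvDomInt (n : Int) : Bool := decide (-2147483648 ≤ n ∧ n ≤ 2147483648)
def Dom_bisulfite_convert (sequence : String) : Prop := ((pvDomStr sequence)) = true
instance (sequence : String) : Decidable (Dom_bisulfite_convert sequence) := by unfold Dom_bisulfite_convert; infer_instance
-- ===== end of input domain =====

-- B replaces A's index-based lookahead loop by a single right-to-left pass carrying a
-- 'next char is G' flag (alternative decomposition, same O(n) cost).


-- ===== PORT A =====
-- A's while loop: index i, lookahead at i+1, append to `methylated`.
def bisulfiteGoA (s : List Char) (i : Nat) (meth : List Char) : List Char :=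
  if h : i < s.length then
    let entry :=
      if s[i] = 'C' then
        if h2 : i + 1 < s.length then
          if s[i + 1] = 'G' then 'C' else 'T'
        else 'T'
      else s[i]
    bisulfiteGoA s (i + 1) (meth ++ [entry])
  else meth
termination_by s.length - i

def bisulfite_convert (sequence : String) : String × String :=
  let s := PySem.Chars.upper sequence.toList
  let methylated := bisulfiteGoA s 0 []
  let unmethylated := PySem.Chars.replace s ['C'] ['T']
  (String.ofList methylated, String.ofList unmethylated)

-- ===== PORT B =====
-- B's loop: fold over the reversed sequence carrying (meth, next_is_g), then reverse.
def bisulfite_convert_alt (sequence : String) : String × String :=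
  let s := PySem.Chars.upper sequence.toList
  let st := s.reverse.foldl
    (fun (st : List Char × Bool) c =>
      (st.1 ++ [if c = 'C' then (if st.2 then 'C' else 'T') else c], c == 'G'))
    ([], false)
  let methylated := st.1.reverse
  let unmethylated := PySem.Chars.replace s ['C'] ['T']
  (String.ofList methylated, String.ofList unmethylated)

-- ===== PRECONDITION & SPEC =====
def Spec_bisulfite_convert (sequence : String) (out : String × String) : Prop := out = bisulfite_convert_alt sequence
instance (sequence : String) (out : String × String) : Decidable (Spec_bisulfite_convert sequence out) := by unfold Spec_bisulfite_convert; infer_instance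

-- ===== CLAIM (what is proved, stated in full; the proofs are below) =====
def Claim_equal_bisulfite_convert : Prop := ∀ (sequence : String), Dom_bisulfite_convert sequence → Spec_bisulfite_convert sequence (bisulfite_convert sequence)

-- ===== LEMMAS AND PROOFS =====
-- Common characterisation: per-character map with one-character lookahead.
def gmeth : List Char → List Char
  | [] => []
  | c :: rest =>
      (if c = 'C' then (if rest.head? = some 'G' then 'C' else 'T') else c) :: gmeth rest

theorem goA_eq (s : List Char) :
    ∀ n i meth, s.length - i ≤ n → bisulfiteGoA s i meth = meth ++ gmeth (s.drop i) := by
  intro n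
  induction n with
  | zero =>
      intro i meth hn
      have hge : s.length ≤ i := by omega
      rw [bisulfiteGoA]
      simp [Nat.not_lt.mpr hge, List.drop_eq_nil_of_le hge, gmeth]
  | succ n ih =>
      intro i meth hn
      rw [bisulfiteGoA]
      by_cases h : i < s.length
      · simp only [h, dif_pos]
        rw [ih (i + 1) _ (by omega)]
        have hdrop : s.drop i = s[i] :: s.drop (i + 1) := (List.getElem_cons_drop h).symm
        rw [hdrop, gmeth]
        have hhead : (s.drop (i + 1)).head? = s[i + 1]? := List.head?_drop
        by_cases hh2 : i + 1 < s.length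
        · simp [hh2, hhead]
        · simp [hh2, hhead]
      · simp [h, List.drop_eq_nil_of_le (by omega : s.length ≤ i), gmeth]

theorem foldrB_eq (l : List Char) :
    l.foldr
      (fun c (st : List Char × Bool) =>
        (st.1 ++ [if c = 'C' then (if st.2 then 'C' else 'T') else c], c == 'G'))
      ([], false)
    = ((gmeth l).reverse, l.head? == some 'G') := by
  induction l with
  | nil => simp [gmeth]
  | cons c rest ih =>
      simp only [List.foldr_cons, ih, gmeth]
      by_cases hc : c = 'C'
      · by_cases hg : rest.head? = some 'G' <;> simp [hc, hg]
      · simp [hc]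

theorem bisulfite_convert_eq_alt (sequence : String) :
    bisulfite_convert sequence = bisulfite_convert_alt sequence := by
  unfold bisulfite_convert bisulfite_convert_alt
  simp only [List.foldl_reverse]
  rw [foldrB_eq, goA_eq (PySem.Chars.upper sequence.toList) (PySem.Chars.upper sequence.toList).length 0 [] (by omega)]
  simp

-- ===== VERDICT (by name: the statement is the Claim_ definition above) =====
theorem bisulfite_convert_spec : Claim_equal_bisulfite_convert := by
  intro sequence _
  unfold Spec_bisulfite_convert
  exact bisulfite_convert_eq_alt sequence
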